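-- pv_equiv track=rewrite | github.com/xionter/python-defrag | analysis/analyser.py | to_extents
-- ===== SOURCE A (Python) =====
-- from typing import List, Tuple, Dict, Optional
-- from typing import List, Tuple, Dict, Optional
--
-- def to_extents(chain: List[int]) -> List[Tuple[int, int]]:
--     if not chain:
--         return []
--     extents: List[Tuple[int,int]] = []
--     start = chain[0]
--     length = 1
--     for prev, cur in zip(chain, chain[1:]):
--         if cur == prev + 1:
--             length += 1
--         else:
--             extents.append((start, length))
--             start, length = cur, 1
--     extents.append((start, length))
--     return extents
-- ===== SOURCE B (Python) =====
-- def to_extents(chain):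
--     # Build extents back-to-front: scan from the right, merging each element
--     # into the run in front of it; no running start/length accumulator.
--     rev = []
--     for x in reversed(chain):
--         if rev and rev[-1][0] == x + 1:
--             rev[-1] = (x, rev[-1][1] + 1)
--         else:
--             rev.append((x, 1))
--     rev.reverse()
--     return rev
-- ===== Notes on version B (the rewrite author's own statement) =====
-- stated objective: alternative
-- what changed: B builds the extents back-to-front by a right-to-left pass that merges each element into the run that follows it, instead of A's left-to-right loop threading a running (start, length) accumulator over adjacent pairs.
import Mathlib
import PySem

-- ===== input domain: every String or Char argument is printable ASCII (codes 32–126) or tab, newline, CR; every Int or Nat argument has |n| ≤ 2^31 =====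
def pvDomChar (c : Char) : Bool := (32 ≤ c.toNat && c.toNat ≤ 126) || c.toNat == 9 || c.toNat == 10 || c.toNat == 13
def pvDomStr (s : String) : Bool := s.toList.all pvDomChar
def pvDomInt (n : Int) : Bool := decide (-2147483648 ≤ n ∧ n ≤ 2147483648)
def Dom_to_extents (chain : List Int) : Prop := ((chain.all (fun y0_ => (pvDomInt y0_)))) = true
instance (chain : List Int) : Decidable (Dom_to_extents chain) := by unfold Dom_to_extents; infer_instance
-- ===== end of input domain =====

-- B builds extents back-to-front by merging each element into the following run (a right fold), instead of A's left-to-right (start,length) accumulator loop; objective: alternative, same O(n) cost.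


-- ===== PORT A =====
-- A's loop over zip(chain, chain[1:]) with state (extents, start, length)
def pvStepA (s : List (Int × Int) × Int × Int) (pc : Int × Int) : List (Int × Int) × Int × Int :=
  if pc.2 = pc.1 + 1 then (s.1, s.2.1, s.2.2 + 1)
  else (s.1 ++ [(s.2.1, s.2.2)], pc.2, 1)

def to_extents (chain : List Int) : List (Int × Int) :=
  match chain with
  | [] => []
  | c :: _ =>
    let f := (chain.zip chain.tail).foldl pvStepA ([], c, 1)
    f.1 ++ [(f.2.1, f.2.2)]

-- ===== PORT B =====
-- Source B's merge of one element x into the list in front of it. Source B keeps `rev`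
-- (extents built back-to-front, appended at the end, reversed once at the end);
-- the port keeps the same list already in final order (head = rev[-1]), so the
-- loop over reversed(chain) is the foldr below and the final reverse is a no-op.
def pvMergeB (x : Int) (acc : List (Int × Int)) : List (Int × Int) :=
  match acc with
  | (s, l) :: rest => if s = x + 1 then (x, l + 1) :: rest else (x, 1) :: (s, l) :: rest
  | [] => [(x, 1)]

def to_extents_alt (chain : List Int) : List (Int × Int) :=
  chain.foldr pvMergeB []

-- ===== PRECONDITION & SPEC =====
def Spec_to_extents (chain : List Int) (out : List (Int × Int)) : Prop := out = to_extents_alt chain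
instance (chain : List Int) (out : List (Int × Int)) : Decidable (Spec_to_extents chain out) := by unfold Spec_to_extents; infer_instance

-- ===== CLAIM (what is proved, stated in full; the proofs are below) =====
def Claim_equal_to_extents : Prop := ∀ (chain : List Int), Dom_to_extents chain → Spec_to_extents chain (to_extents chain)

-- ===== LEMMAS AND PROOFS =====

-- A's loop rewritten as plain recursion over the pair list (no accumulator)
def pvRuns (s l : Int) : List (Int × Int) → List (Int × Int)
  | [] => [(s, l)]
  | (p, c) :: r => if c = p + 1 then pvRuns s (l + 1) r else (s, l) :: pvRuns c 1 r

-- length of the initial consecutive prefix of the pair list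
def pvInc : List (Int × Int) → Int
  | [] => 0
  | (p, c) :: r => if c = p + 1 then 1 + pvInc r else 0

-- the extents after the first one, independent of s and l
def pvRst : List (Int × Int) → List (Int × Int)
  | [] => []
  | (p, c) :: r => if c = p + 1 then pvRst r else pvRuns c 1 r

theorem pvRuns_head : ∀ (ps : List (Int × Int)) (s l : Int),
    pvRuns s l ps = (s, l + pvInc ps) :: pvRst ps := by
  intro ps
  induction ps with
  | nil => intro s l; simp [pvRuns, pvInc, pvRst]
  | cons pc r ih =>
    intro s l
    obtain ⟨p, c⟩ := pc
    by_cases h : c = p + 1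
    · simp [pvRuns, pvInc, pvRst, h, ih]; ring
    · simp [pvRuns, pvInc, pvRst, h]

theorem pvFoldA_runs : ∀ (ps : List (Int × Int)) (acc : List (Int × Int)) (s l : Int),
    (ps.foldl pvStepA (acc, s, l)).1 ++ [((ps.foldl pvStepA (acc, s, l)).2.1, (ps.foldl pvStepA (acc, s, l)).2.2)]
      = acc ++ pvRuns s l ps := by
  intro ps
  induction ps with
  | nil => intro acc s l; simp [pvRuns]
  | cons pc r ih =>
    intro acc s l
    obtain ⟨p, c⟩ := pc
    by_cases h : c = p + 1
    · simp [List.foldl, pvStepA, pvRuns, h, ih]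
    · simp [List.foldl, pvStepA, pvRuns, h, ih]

theorem pvRuns_foldr : ∀ (cs : List Int) (c : Int),
    pvRuns c 1 ((c :: cs).zip cs) = (c :: cs).foldr pvMergeB [] := by
  intro cs
  induction cs with
  | nil => intro c; simp [pvRuns, pvMergeB]
  | cons d ds ih =>
    intro c
    have hR : (d :: ds).foldr pvMergeB [] = pvRuns d 1 ((d :: ds).zip ds) := (ih d).symm
    show pvRuns c 1 ((c, d) :: (d :: ds).zip ds) = pvMergeB c ((d :: ds).foldr pvMergeB [])
    rw [hR, pvRuns_head ((d :: ds).zip ds) d 1]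
    by_cases h : d = c + 1
    · rw [pvRuns, if_pos h, pvRuns_head]
      simp [pvMergeB, h]
      ring
    · rw [pvRuns, if_neg h, pvRuns_head]
      simp [pvMergeB, h]

-- ===== VERDICT (by name: the statement is the Claim_ definition above) =====
theorem to_extents_spec : Claim_equal_to_extents := by
  intro chain _
  unfold Spec_to_extents to_extents to_extents_alt
  match chain with
  | [] => rfl
  | c :: cs =>
    simp only [List.tail_cons]
    rw [pvFoldA_runs ((c :: cs).zip cs) [] c 1, List.nil_append, pvRuns_foldr]
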